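-- pv_equiv track=rewrite | github.com/AkashG555/Akash_DMToolkit | unit_testing_operations.py | prioritize_validation_rules
-- ===== SOURCE A (Python) =====
-- from typing import Dict, List, Optional, Tuple, Any
--
-- def prioritize_validation_rules(validation_rules: List[Dict], risk_prioritization: str) -> List[Dict]:
--     """Prioritize validation rules based on risk prioritization strategy"""
--     if not validation_rules:
--         return []
--
--     if risk_prioritization == "High Risk First":
--         return sorted(validation_rules, key=lambda r: {'high': 0, 'medium': 1, 'low': 2}[r.get('risk_level', 'low')])
--     elif risk_prioritization == "Balanced Coverage":
--         # Mix high, medium, low risk rules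
--         high_risk = [r for r in validation_rules if r.get('risk_level') == 'high']
--         medium_risk = [r for r in validation_rules if r.get('risk_level') == 'medium']
--         low_risk = [r for r in validation_rules if r.get('risk_level') == 'low']
--
--         # Interleave for balanced coverage
--         balanced = []
--         max_len = max(len(high_risk), len(medium_risk), len(low_risk))
--         for i in range(max_len):
--             if i < len(high_risk): balanced.append(high_risk[i])
--             if i < len(medium_risk): balanced.append(medium_risk[i])
--             if i < len(low_risk): balanced.append(low_risk[i])
--
--         return balanced
--     else:  # Comprehensive All
--         return validation_rules
-- ===== SOURCE B (Python) =====
-- def prioritize_validation_rules(validation_rules, risk_prioritization):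
--     """Prioritize validation rules based on risk prioritization strategy"""
--     if risk_prioritization == "High Risk First":
--         # linear three-way bucket pass instead of a comparison sort
--         buckets = {'high': [], 'medium': [], 'low': []}
--         for r in validation_rules:
--             buckets[r.get('risk_level', 'low')].append(r)
--         return buckets['high'] + buckets['medium'] + buckets['low']
--     if risk_prioritization == "Balanced Coverage":
--         # one pass to bucket, then round-robin interleave by peeling heads
--         buckets = {'high': [], 'medium': [], 'low': []}
--         for r in validation_rules:
--             lvl = r.get('risk_level')
--             if lvl in buckets:
--                 buckets[lvl].append(r)
--         out = []
--         h, m, l = buckets['high'], buckets['medium'], buckets['low']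
--         while h or m or l:
--             out.extend(h[:1] + m[:1] + l[:1])
--             h, m, l = h[1:], m[1:], l[1:]
--         return out
--     return validation_rules
-- ===== Notes on version B (the rewrite author's own statement) =====
-- stated objective: alternative
-- what changed: The 'High Risk First' stable sort is replaced by a single linear three-way bucket pass (high+medium+low concatenation), and the 'Balanced Coverage' three filter passes plus index loop are replaced by one bucket pass followed by a head-peeling round-robin interleave.
import Mathlib
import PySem

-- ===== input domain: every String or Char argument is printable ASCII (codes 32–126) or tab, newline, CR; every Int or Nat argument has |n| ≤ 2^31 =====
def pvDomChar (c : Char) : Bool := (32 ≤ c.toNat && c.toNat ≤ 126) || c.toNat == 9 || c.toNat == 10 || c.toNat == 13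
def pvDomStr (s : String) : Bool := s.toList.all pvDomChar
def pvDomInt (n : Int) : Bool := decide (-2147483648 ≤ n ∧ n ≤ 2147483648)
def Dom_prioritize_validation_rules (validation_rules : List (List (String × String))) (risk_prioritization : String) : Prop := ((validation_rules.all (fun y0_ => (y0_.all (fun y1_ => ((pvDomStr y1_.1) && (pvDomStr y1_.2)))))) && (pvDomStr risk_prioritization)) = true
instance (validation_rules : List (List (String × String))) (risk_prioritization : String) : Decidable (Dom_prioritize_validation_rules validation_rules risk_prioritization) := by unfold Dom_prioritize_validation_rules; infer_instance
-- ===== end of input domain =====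

-- B replaces the stable sort of the "High Risk First" branch by a linear one-pass three-way
-- bucket pass, and the three-filter-passes-plus-index-loop of "Balanced Coverage" by a
-- one-pass bucket followed by a head-peeling round-robin interleave (objective: alternative).

-- ===== PORT A =====
-- r.get('risk_level', 'low') : first-match lookup in the assoc list, default 'low'
def pvGetLvlA (r : List (String × String)) : String :=
  (((r.find? (fun p => p.1 == "risk_level")).map (fun p => p.2)).getD "low")
-- r.get('risk_level') : first-match lookup, default None
def pvGetA (r : List (String × String)) : Option String :=
  (r.find? (fun p => p.1 == "risk_level")).map (fun p => p.2)
-- {'high': 0, 'medium': 1, 'low': 2}[lvl]; any other lvl raises KeyError in Python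
-- (those inputs are excluded by Pre_; 3 is a placeholder value there)
def pvKeyA (r : List (String × String)) : Int :=
  let s := pvGetLvlA r
  if s = "high" then 0 else if s = "medium" then 1 else if s = "low" then 2 else 3

def prioritize_validation_rules (validation_rules : List (List (String × String))) (risk_prioritization : String) : List (List (String × String)) :=
  if validation_rules.isEmpty then []
  else if risk_prioritization = "High Risk First" then
    PySem.List.sorted validation_rules pvKeyA
  else if risk_prioritization = "Balanced Coverage" then
    let high_risk := validation_rules.filter (fun r => pvGetA r == some "high")
    let medium_risk := validation_rules.filter (fun r => pvGetA r == some "medium")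
    let low_risk := validation_rules.filter (fun r => pvGetA r == some "low")
    let max_len : Int := max (max (high_risk.length : Int) (medium_risk.length : Int)) (low_risk.length : Int)
    (PySem.List.pyRange 0 max_len 1).foldl (fun bal i =>
      let bal := if i < (high_risk.length : Int) then bal ++ [PySem.List.pyGetD high_risk i []] else bal
      let bal := if i < (medium_risk.length : Int) then bal ++ [PySem.List.pyGetD medium_risk i []] else bal
      if i < (low_risk.length : Int) then bal ++ [PySem.List.pyGetD low_risk i []] else bal) []
  else validation_rules

-- ===== PORT B =====
def pvGetLvlB (r : List (String × String)) : String :=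
  (((r.find? (fun p => p.1 == "risk_level")).map (fun p => p.2)).getD "low")
def pvGetB (r : List (String × String)) : Option String :=
  (r.find? (fun p => p.1 == "risk_level")).map (fun p => p.2)

-- buckets[r.get('risk_level', 'low')].append(r); an unknown level raises KeyError in
-- Python (excluded by Pre_; the accumulator is returned unchanged there)
def pvBucketHRF (validation_rules : List (List (String × String))) :
    List (List (String × String)) × List (List (String × String)) × List (List (String × String)) :=
  validation_rules.foldl (fun acc r =>
    let lvl := pvGetLvlB r
    if lvl = "high" then (acc.1 ++ [r], acc.2.1, acc.2.2)
    else if lvl = "medium" then (acc.1, acc.2.1 ++ [r], acc.2.2)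
    else if lvl = "low" then (acc.1, acc.2.1, acc.2.2 ++ [r])
    else acc) ([], [], [])

-- if lvl in buckets: buckets[lvl].append(r)
def pvBucketBal (validation_rules : List (List (String × String))) :
    List (List (String × String)) × List (List (String × String)) × List (List (String × String)) :=
  validation_rules.foldl (fun acc r =>
    let lvl := pvGetB r
    if lvl == some "high" then (acc.1 ++ [r], acc.2.1, acc.2.2)
    else if lvl == some "medium" then (acc.1, acc.2.1 ++ [r], acc.2.2)
    else if lvl == some "low" then (acc.1, acc.2.1, acc.2.2 ++ [r])
    else acc) ([], [], [])

-- while h or m or l: out.extend(h[:1] + m[:1] + l[:1]); h, m, l = h[1:], m[1:], l[1:]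
def pvInterleave (h m l : List (List (String × String))) : List (List (String × String)) :=
  if h.isEmpty && m.isEmpty && l.isEmpty then []
  else (h.take 1 ++ m.take 1 ++ l.take 1) ++ pvInterleave (h.drop 1) (m.drop 1) (l.drop 1)
termination_by h.length + m.length + l.length
decreasing_by
  rename_i hne
  simp only [Bool.and_eq_true, List.isEmpty_iff] at hne
  simp only [List.length_drop]
  rcases h with _ | ⟨x, h⟩ <;> rcases m with _ | ⟨y, m⟩ <;> rcases l with _ | ⟨z, l⟩ <;>
    simp_all <;> omega

def prioritize_validation_rules_alt (validation_rules : List (List (String × String))) (risk_prioritization : String) : List (List (String × String)) :=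
  if risk_prioritization = "High Risk First" then
    let b := pvBucketHRF validation_rules
    b.1 ++ b.2.1 ++ b.2.2
  else if risk_prioritization = "Balanced Coverage" then
    let b := pvBucketBal validation_rules
    pvInterleave b.1 b.2.1 b.2.2
  else validation_rules

-- ===== PRECONDITION & SPEC =====
-- helper for Pre_ only: the value of r.get('risk_level', 'low')
def pvLvl (r : List (String × String)) : String :=
  (((r.find? (fun p => p.1 == "risk_level")).map (fun p => p.2)).getD "low")

-- Pre_ excludes exactly the inputs on which A raises KeyError: strategy "High Risk First"
-- together with some rule whose risk_level value is none of 'high'/'medium'/'low'.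
def Pre_prioritize_validation_rules (validation_rules : List (List (String × String))) (risk_prioritization : String) : Prop :=
  risk_prioritization = "High Risk First" →
    ∀ r ∈ validation_rules, pvLvl r = "high" ∨ pvLvl r = "medium" ∨ pvLvl r = "low"
instance (validation_rules : List (List (String × String))) (risk_prioritization : String) : Decidable (Pre_prioritize_validation_rules validation_rules risk_prioritization) := by unfold Pre_prioritize_validation_rules; infer_instance

def pvWitness_prioritize_validation_rules : (List (List (String × String))) × String :=
  ([[("risk_level", "high"), ("name", "a")], [("name", "b")], [("risk_level", "medium")]], "High Risk First")

def Spec_prioritize_validation_rules (validation_rules : List (List (String × String))) (risk_prioritization : String) (out : List (List (String × String))) : Prop := out = prioritize_validation_rules_alt validation_rules risk_prioritization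
instance (validation_rules : List (List (String × String))) (risk_prioritization : String) (out : List (List (String × String))) : Decidable (Spec_prioritize_validation_rules validation_rules risk_prioritization out) := by unfold Spec_prioritize_validation_rules; infer_instance

-- ===== CLAIM (what is proved, stated in full; the proofs are below) =====
def Claim_equal_prioritize_validation_rules : Prop := ∀ (validation_rules : List (List (String × String))) (risk_prioritization : String), Dom_prioritize_validation_rules validation_rules risk_prioritization → Pre_prioritize_validation_rules validation_rules risk_prioritization → Spec_prioritize_validation_rules validation_rules risk_prioritization (prioritize_validation_rules validation_rules risk_prioritization)

-- ===== LEMMAS AND PROOFS =====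

theorem pv_insertBy_cons (bef : List (String × String) → List (String × String) → Bool)
    (x y : List (String × String)) (ys : List (List (String × String))) :
    PySem.List.insertBy bef x (y :: ys) =
      if bef x y then x :: y :: ys else y :: PySem.List.insertBy bef x ys := by
  simp [PySem.List.insertBy]

theorem pv_insertBy_skip (bef : List (String × String) → List (String × String) → Bool)
    (x : List (String × String)) (as bs : List (List (String × String)))
    (h : ∀ a ∈ as, bef x a = false) :
    PySem.List.insertBy bef x (as ++ bs) = as ++ PySem.List.insertBy bef x bs := by
  induction as with
  | nil => simp
  | cons a as ih =>
    rw [List.cons_append, pv_insertBy_cons, h a (by simp), ih (fun a ha => h a (by simp [ha]))]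
    simp

theorem pv_insertBy_front (bef : List (String × String) → List (String × String) → Bool)
    (x : List (String × String)) (bs : List (List (String × String)))
    (h : ∀ b ∈ bs, bef x b = true) :
    PySem.List.insertBy bef x bs = x :: bs := by
  cases bs with
  | nil => simp [PySem.List.insertBy]
  | cons b bs => rw [pv_insertBy_cons, h b (by simp)]; simp

-- stable 3-valued sort = concatenation of the three key-filters
theorem pv_sorted3 (key : List (String × String) → Int) (xs : List (List (String × String)))
    (h : ∀ r ∈ xs, key r = 0 ∨ key r = 1 ∨ key r = 2) :
    PySem.List.sorted xs key =
      xs.filter (fun r => key r == 0) ++ xs.filter (fun r => key r == 1) ++ xs.filter (fun r => key r == 2) := by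
  rw [PySem.List.sorted_eq_foldl_insertBy]
  induction xs using List.reverseRecOn with
  | nil => simp
  | append_singleton ys x ih =>
    have hys : ∀ r ∈ ys, key r = 0 ∨ key r = 1 ∨ key r = 2 := fun r hr => h r (by simp [hr])
    rw [List.foldl_append, List.foldl_cons, List.foldl_nil, ih hys]
    have hm0 : ∀ a ∈ ys.filter (fun r => key r == 0), key a = 0 := by
      intro a ha; simpa using (List.of_mem_filter ha)
    have hm1 : ∀ a ∈ ys.filter (fun r => key r == 1), key a = 1 := by
      intro a ha; simpa using (List.of_mem_filter ha)
    have hm2 : ∀ a ∈ ys.filter (fun r => key r == 2), key a = 2 := by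
      intro a ha; simpa using (List.of_mem_filter ha)
    rcases h x (by simp) with hx | hx | hx
    · rw [List.append_assoc,
        pv_insertBy_skip _ _ _ _ (fun a ha => by simp [hm0 a ha, hx]),
        pv_insertBy_front _ _ _ (fun b hb => by
          rcases List.mem_append.mp hb with hb | hb
          · simp [hm1 b hb, hx]
          · simp [hm2 b hb, hx])]
      simp [List.filter_append, hx]
    · rw [List.append_assoc,
        pv_insertBy_skip _ _ _ _ (fun a ha => by simp [hm0 a ha, hx]),
        pv_insertBy_skip _ _ _ _ (fun a ha => by simp [hm1 a ha, hx]),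
        pv_insertBy_front _ _ _ (fun b hb => by simp [hm2 b hb, hx])]
      simp [List.filter_append, hx]
    · rw [pv_insertBy_skip _ _ _ _ (fun a ha => by
          rcases List.mem_append.mp ha with ha | ha
          · simp [hm0 a ha, hx]
          · simp [hm1 a ha, hx]),
        PySem.List.insertBy_of_forall_not_before _ _ _ (fun b hb => by simp [hm2 b hb, hx])]
      simp [List.filter_append, hx]

-- the High-Risk-First bucket pass produces the three level-filters (valid levels only)
theorem pv_bucketHRF_filters (xs : List (List (String × String)))
    (a b c : List (List (String × String)))
    (h : ∀ r ∈ xs, pvGetLvlB r = "high" ∨ pvGetLvlB r = "medium" ∨ pvGetLvlB r = "low") :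
    xs.foldl (fun acc r =>
      let lvl := pvGetLvlB r
      if lvl = "high" then (acc.1 ++ [r], acc.2.1, acc.2.2)
      else if lvl = "medium" then (acc.1, acc.2.1 ++ [r], acc.2.2)
      else if lvl = "low" then (acc.1, acc.2.1, acc.2.2 ++ [r])
      else acc) (a, b, c) =
      (a ++ xs.filter (fun r => pvGetLvlB r == "high"),
       b ++ xs.filter (fun r => pvGetLvlB r == "medium"),
       c ++ xs.filter (fun r => pvGetLvlB r == "low")) := by
  induction xs generalizing a b c with
  | nil => simp
  | cons x xs ih =>
    have hxs : ∀ r ∈ xs, pvGetLvlB r = "high" ∨ pvGetLvlB r = "medium" ∨ pvGetLvlB r = "low" :=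
      fun r hr => h r (by simp [hr])
    rcases h x (by simp) with hx | hx | hx <;>
      simp only [List.foldl_cons, hx, List.filter_cons] <;>
      rw [ih _ _ _ hxs] <;> simp [hx]

-- the Balanced bucket pass produces the three level-filters (unconditionally)
theorem pv_bucketBal_filters (xs : List (List (String × String)))
    (a b c : List (List (String × String))) :
    xs.foldl (fun acc r =>
      let lvl := pvGetB r
      if lvl == some "high" then (acc.1 ++ [r], acc.2.1, acc.2.2)
      else if lvl == some "medium" then (acc.1, acc.2.1 ++ [r], acc.2.2)
      else if lvl == some "low" then (acc.1, acc.2.1, acc.2.2 ++ [r])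
      else acc) (a, b, c) =
      (a ++ xs.filter (fun r => pvGetB r == some "high"),
       b ++ xs.filter (fun r => pvGetB r == some "medium"),
       c ++ xs.filter (fun r => pvGetB r == some "low")) := by
  induction xs generalizing a b c with
  | nil => simp
  | cons x xs ih =>
    by_cases e1 : pvGetB x = some "high"
    · simp only [List.foldl_cons, e1, List.filter_cons]
      rw [show ((some "high" : Option String) == some "high") = true from rfl]
      simp only [if_true]
      rw [ih]
      simp
    · by_cases e2 : pvGetB x = some "medium"
      · simp only [List.foldl_cons, e2, List.filter_cons]
        rw [show ((some "medium" : Option String) == some "high") = false from rfl,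
          show ((some "medium" : Option String) == some "medium") = true from rfl]
        simp only [if_false, if_true]
        rw [ih]
        simp
      · by_cases e3 : pvGetB x = some "low"
        · simp only [List.foldl_cons, e3, List.filter_cons]
          rw [show ((some "low" : Option String) == some "high") = false from rfl,
            show ((some "low" : Option String) == some "medium") = false from rfl,
            show ((some "low" : Option String) == some "low") = true from rfl]
          simp only [if_false, if_true]
          rw [ih]
          simp
        · have f1 : (pvGetB x == some "high") = false := by simp [e1]
          have f2 : (pvGetB x == some "medium") = false := by simp [e2]
          have f3 : (pvGetB x == some "low") = false := by simp [e3]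
          simp only [List.foldl_cons, f1, f2, f3, List.filter_cons, if_false]
          rw [ih]
          simp

def pvOptNth (h : List (List (String × String))) (k : Nat) : List (List (String × String)) :=
  if k < h.length then [h.getD k []] else []

theorem pvOptNth_zero (h : List (List (String × String))) : pvOptNth h 0 = h.take 1 := by
  cases h <;> simp [pvOptNth]

theorem pvOptNth_succ (h : List (List (String × String))) (k : Nat) :
    pvOptNth h (k + 1) = pvOptNth (h.drop 1) k := by
  cases h <;> simp [pvOptNth]

theorem pv_flatMap_interleave : ∀ (n : Nat) (h m l : List (List (String × String))),
    n = max (max h.length m.length) l.length →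
    (List.range n).flatMap (fun k => pvOptNth h k ++ pvOptNth m k ++ pvOptNth l k) =
      pvInterleave h m l := by
  intro n
  induction n with
  | zero =>
    intro h m l hn
    have hh : h = [] := List.length_eq_zero_iff.mp (by omega)
    have hm : m = [] := List.length_eq_zero_iff.mp (by omega)
    have hl : l = [] := List.length_eq_zero_iff.mp (by omega)
    subst hh; subst hm; subst hl
    rw [pvInterleave]; simp
  | succ n ih =>
    intro h m l hn
    rw [List.range_succ_eq_map, List.flatMap_cons, List.flatMap_map]
    have hshift : ∀ k : Nat,
        ((fun k => pvOptNth h k ++ pvOptNth m k ++ pvOptNth l k) ∘ Nat.succ) k =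
        pvOptNth (h.drop 1) k ++ pvOptNth (m.drop 1) k ++ pvOptNth (l.drop 1) k := by
      intro k
      simp only [Function.comp_apply, Nat.succ_eq_add_one, pvOptNth_succ]
    simp only [Nat.succ_eq_add_one, pvOptNth_succ]
    rw [ih (h.drop 1) (m.drop 1) (l.drop 1) (by simp; omega)]
    have hne : ¬(h.isEmpty && m.isEmpty && l.isEmpty) = true := by
      simp only [Bool.and_eq_true, List.isEmpty_iff]
      rintro ⟨⟨h1, h2⟩, h3⟩
      subst h1; subst h2; subst h3; simp at hn
    conv_rhs => rw [pvInterleave]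
    rw [if_neg hne]
    simp [pvOptNth_zero]

-- the A-side balanced index loop is the flatMap of the three optional picks
theorem pv_loopA_eq (h m l : List (List (String × String))) :
    (PySem.List.pyRange 0 (max (max (h.length : Int) (m.length : Int)) (l.length : Int)) 1).foldl
      (fun bal i =>
        let bal := if i < (h.length : Int) then bal ++ [PySem.List.pyGetD h i []] else bal
        let bal := if i < (m.length : Int) then bal ++ [PySem.List.pyGetD m i []] else bal
        if i < (l.length : Int) then bal ++ [PySem.List.pyGetD l i []] else bal) [] =
    (List.range (max (max h.length m.length) l.length)).flatMap
      (fun k => pvOptNth h k ++ pvOptNth m k ++ pvOptNth l k) := by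
  have hcast : (max (max (h.length : Int) (m.length : Int)) (l.length : Int)) =
      ((max (max h.length m.length) l.length : Nat) : Int) := by push_cast; ring_nf
  rw [hcast, PySem.List.pyRange_zero_nat, List.foldl_map]
  have hstep : ∀ (bal : List (List (String × String))) (k : Nat),
      (fun bal (i : Int) =>
        let bal := if i < (h.length : Int) then bal ++ [PySem.List.pyGetD h i []] else bal
        let bal := if i < (m.length : Int) then bal ++ [PySem.List.pyGetD m i []] else bal
        if i < (l.length : Int) then bal ++ [PySem.List.pyGetD l i []] else bal) bal (k : Int) =
      bal ++ (pvOptNth h k ++ pvOptNth m k ++ pvOptNth l k) := by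
    intro bal k
    simp only [pvOptNth, Nat.cast_lt, PySem.List.pyGetD_natCast]
    split_ifs <;> simp
  have hgen : ∀ (ks : List Nat) (init : List (List (String × String))),
      ks.foldl (fun x (y : Nat) =>
        let bal := if (y : Int) < (h.length : Int) then x ++ [PySem.List.pyGetD h (y : Int) []] else x
        let bal := if (y : Int) < (m.length : Int) then bal ++ [PySem.List.pyGetD m (y : Int) []] else bal
        if (y : Int) < (l.length : Int) then bal ++ [PySem.List.pyGetD l (y : Int) []] else bal) init =
      init ++ ks.flatMap (fun k => pvOptNth h k ++ pvOptNth m k ++ pvOptNth l k) := by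
    intro ks
    induction ks with
    | nil => intro init; simp
    | cons k ks ihk =>
      intro init
      rw [List.foldl_cons, List.flatMap_cons, ihk]
      have h1 := hstep init k
      simp only [] at h1
      rw [h1]
      simp [List.append_assoc]
  exact (hgen (List.range (max (max h.length m.length) l.length)) []).trans (List.nil_append _)

theorem pvGetLvlA_eq : pvGetLvlA = pvGetLvlB := rfl
theorem pvGetA_eq : pvGetA = pvGetB := rfl
theorem pvLvl_eq : pvLvl = pvGetLvlB := rfl

theorem pv_key_filter0 (r : List (String × String)) :
    ((pvKeyA r) == (0 : Int)) = (pvGetLvlB r == "high") := by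
  simp only [pvKeyA, pvGetLvlA_eq]
  split_ifs with h1 h2 h3 <;> simp_all
theorem pv_key_filter1 (r : List (String × String)) :
    ((pvKeyA r) == (1 : Int)) = (pvGetLvlB r == "medium") := by
  simp only [pvKeyA, pvGetLvlA_eq]
  split_ifs with h1 h2 h3 <;> simp_all
theorem pv_key_filter2 (r : List (String × String)) :
    ((pvKeyA r) == (2 : Int)) = (pvGetLvlB r == "low") := by
  simp only [pvKeyA, pvGetLvlA_eq]
  split_ifs with h1 h2 h3 <;> simp_all

-- ===== VERDICT (by name: the statement is the Claim_ definition above) =====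
theorem prioritize_validation_rules_spec : Claim_equal_prioritize_validation_rules := by
  intro vr rp _dom pre
  unfold Spec_prioritize_validation_rules
  unfold prioritize_validation_rules prioritize_validation_rules_alt
  by_cases hemp : vr.isEmpty
  · have hv : vr = [] := List.isEmpty_iff.mp hemp
    subst hv
    simp only [hemp, if_pos]
    by_cases h1 : rp = "High Risk First"
    · simp [h1, pvBucketHRF]
    · by_cases h2 : rp = "Balanced Coverage"
      · rw [if_neg h1, if_pos h2]
        simp only [pvBucketBal, List.foldl_nil]
        rw [pvInterleave]; simp
      · simp [h1, h2]
  · rw [if_neg hemp]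
    by_cases h1 : rp = "High Risk First"
    · rw [if_pos h1, if_pos h1]
      have hpre : ∀ r ∈ vr, pvGetLvlB r = "high" ∨ pvGetLvlB r = "medium" ∨ pvGetLvlB r = "low" := by
        intro r hr
        have := pre h1 r hr
        rwa [pvLvl_eq] at this
      have hkey : ∀ r ∈ vr, pvKeyA r = 0 ∨ pvKeyA r = 1 ∨ pvKeyA r = 2 := by
        intro r hr
        rcases hpre r hr with h | h | h <;>
          simp [pvKeyA, pvGetLvlA_eq, h]
      rw [pv_sorted3 pvKeyA vr hkey]
      show _ = (pvBucketHRF vr).1 ++ (pvBucketHRF vr).2.1 ++ (pvBucketHRF vr).2.2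
      unfold pvBucketHRF
      rw [pv_bucketHRF_filters vr [] [] [] hpre]
      simp only [List.nil_append]
      rw [List.filter_congr (fun r _ => pv_key_filter0 r),
        List.filter_congr (fun r _ => pv_key_filter1 r),
        List.filter_congr (fun r _ => pv_key_filter2 r)]
    · rw [if_neg h1, if_neg h1]
      by_cases h2 : rp = "Balanced Coverage"
      · rw [if_pos h2, if_pos h2]
        simp only []
        rw [pv_loopA_eq]
        show _ = pvInterleave (pvBucketBal vr).1 (pvBucketBal vr).2.1 (pvBucketBal vr).2.2
        unfold pvBucketBal
        rw [pv_bucketBal_filters vr [] [] []]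
        simp only [List.nil_append]
        rw [pv_flatMap_interleave _ _ _ _ rfl]
        simp only [pvGetA_eq]
      · rw [if_neg h2, if_neg h2]
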